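-- pv_equiv track=rewrite | github.com/seokjunh/study-algorithm | programmers/lv.2/70129. 이진변환 반복하기.py | solution
-- ===== SOURCE A (Python) =====
-- def solution(s):
--     answer = [0,0]
--
--     while True:
--
--         if s == "1":
--             break
--
--         zero = s.count("0")
--         one = len(s) - zero
--
--         result = ""
--         while one >= 1:
--             result += str(one % 2)
--             one = one // 2
--
--         s = result[::-1]
--
--         answer[0] += 1
--         answer[1] += zero
--
--     return answer
-- ===== SOURCE B (Python) =====
-- def solution(s):
--     # Staged passes: materialise the chain of successive ones-counts down to 1,
--     # then derive each stage's string length and sum the zeros with a zip;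
--     # no mutable answer accumulator and no intermediate strings.
--     if s == "1":
--         return [0, 0]
--     ones = len(s) - s.count("0")
--     chain = [ones]
--     while chain[-1] != 1:
--         chain.append(bin(chain[-1]).count("1"))
--     lengths = [len(s)] + [v.bit_length() for v in chain[:-1]]
--     return [len(chain), sum(L - o for L, o in zip(lengths, chain))]
-- ===== Notes on version B (the rewrite author's own statement) =====
-- stated objective: alternative
-- what changed: B replaces A's single mutable loop (rebuild the binary string by hand, recount, bump two accumulators) by staged passes with no accumulators and no strings: it first materialises the list of successive ones-counts down to 1 via popcount, then derives the stage lengths by mapping bit_length and returns [len(chain), sum of zip-differences].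
import Mathlib
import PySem

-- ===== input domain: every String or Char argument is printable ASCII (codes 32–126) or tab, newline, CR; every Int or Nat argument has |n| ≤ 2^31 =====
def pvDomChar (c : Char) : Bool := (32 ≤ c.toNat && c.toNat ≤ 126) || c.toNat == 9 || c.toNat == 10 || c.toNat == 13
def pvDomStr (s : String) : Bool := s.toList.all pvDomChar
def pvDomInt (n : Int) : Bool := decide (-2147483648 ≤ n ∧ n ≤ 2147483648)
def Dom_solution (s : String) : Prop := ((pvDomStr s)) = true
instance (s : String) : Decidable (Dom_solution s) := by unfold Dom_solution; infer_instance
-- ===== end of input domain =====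

-- B computes the answer in staged passes (chain of ones-counts, then a map and a zip-sum)
-- instead of A's single accumulating loop over rebuilt strings; return-value equivalence
-- is proved on Pre_ (A diverges elsewhere).

-- ===== PORT A =====
-- inner 'while one >= 1' loop: result += str(one % 2); one = one // 2
def aInner (one : Int) (result : List Char) : List Char :=
  if h : 1 ≤ one then
    aInner (PySem.Int.floordiv one 2) (result ++ (PySem.Int.toStr (PySem.Int.mod one 2)).toList)
  else result
termination_by one.toNat
decreasing_by
  have h2 : PySem.Int.floordiv one 2 = one / 2 := PySem.Int.floordiv_eq_ediv_of_pos (by omega)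
  rw [h2]; omega

-- outer 'while True' loop, with fuel (A diverges when the string has no non-'0' char;
-- such inputs are excluded by Pre_solution, and the fuel never runs out on admitted inputs)
def aLoop : Nat → List Char → Int → Int → List Int
  | 0, _, a0, a1 => [a0, a1]
  | f + 1, s, a0, a1 =>
    if s = ['1'] then [a0, a1]
    else
      let zero : Int := (s.count '0' : Int)
      let one : Int := (s.length : Int) - zero
      let result := aInner one []
      aLoop f result.reverse (a0 + 1) (a1 + zero)

def solution (s : String) : List Int :=
  aLoop (s.toList.length + 64) s.toList 0 0

-- ===== PORT B =====
-- Source B's 'while chain[-1] != 1: chain.append(bin(chain[-1]).count("1"))', with the same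
-- fuel budget as A's outer loop (ample on admitted inputs); appending in the Python loop
-- becomes the obvious cons-recursion building the same list
def bChain : Nat → Int → List Int
  | 0, v => [v]
  | f + 1, v =>
    if v = 1 then [v]
    else v :: bChain f ((PySem.Int.bitCount v : Nat) : Int)

def solution_alt (s : String) : List Int :=
  if s = "1" then [0, 0]
  else
    let L : Int := (s.toList.length : Int)
    let ones : Int := L - (s.toList.count '0' : Int)
    let chain := bChain (s.toList.length + 63) ones
    let lengths := L :: chain.dropLast.map (fun v => ((PySem.Int.bitLength v : Nat) : Int))
    [(chain.length : Int), (List.zipWith (fun l o => l - o) lengths chain).sum]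

-- ===== PRECONDITION & SPEC =====
-- Pre_ excludes exactly the inputs on which A loops forever (strings, possibly empty,
-- made only of '0'); A returns on every other input.
def Pre_solution (s : String) : Prop := s.toList.any (fun c => c != '0') = true
instance (s : String) : Decidable (Pre_solution s) := by unfold Pre_solution; infer_instance
def pvWitness_solution : String := "1101"

def Spec_solution (s : String) (out : List Int) : Prop := out = solution_alt s
instance (s : String) (out : List Int) : Decidable (Spec_solution s out) := by unfold Spec_solution; infer_instance

-- ===== CLAIM (what is proved, stated in full; the proofs are below) =====
def Claim_equal_solution : Prop := ∀ (s : String), Dom_solution s → Pre_solution s → Spec_solution s (solution s)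

-- ===== LEMMAS AND PROOFS =====

theorem pyfd (n : Nat) : PySem.Int.floordiv (n : Int) 2 = ((n / 2 : Nat) : Int) := by
  rw [PySem.Int.floordiv_eq_ediv_of_pos (by norm_num)]; omega

theorem pymod (n : Nat) : PySem.Int.mod (n : Int) 2 = ((n % 2 : Nat) : Int) := by
  rw [PySem.Int.mod_eq_emod_of_pos (by norm_num)]; omega

theorem aInner_stop (one : Int) (acc : List Char) (h : ¬ 1 ≤ one) : aInner one acc = acc := by
  rw [aInner]; simp [h]

-- accumulator lemma for A's inner loop
theorem aInner_acc (n : Nat) : ∀ (acc : List Char), aInner (n : Int) acc = acc ++ aInner (n : Int) [] := by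
  induction n using Nat.strong_induction_on with
  | _ n ih =>
    intro acc
    by_cases h : 1 ≤ (n : Int)
    · conv_lhs => rw [aInner]
      conv_rhs => rw [aInner]
      simp only [h, dif_pos, pyfd]
      rw [ih (n / 2) (by omega), ih (n / 2) (by omega) ([] ++ (PySem.Int.toStr (PySem.Int.mod (n : Int) 2)).toList)]
      simp
    · rw [aInner_stop _ acc h, aInner_stop _ [] h]; simp

theorem digit_chars (n : Nat) :
    (PySem.Int.toStr (PySem.Int.mod (n : Int) 2)).toList = [if n % 2 = 0 then '0' else '1'] := by
  rw [pymod]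
  rcases Nat.mod_two_eq_zero_or_one n with h | h <;> rw [h] <;> simp <;> decide

theorem aInner_len (n : Nat) : 0 < n → (aInner (n : Int) []).length = PySem.Int.bitLength (n : Int) := by
  induction n using Nat.strong_induction_on with
  | _ n ih =>
    intro hpos
    conv_lhs => rw [aInner]
    simp only [show (1 : Int) ≤ (n : Int) by omega, dif_pos, pyfd]
    rw [aInner_acc, PySem.Int.bitLength_natCast hpos, digit_chars]
    by_cases h2 : 0 < n / 2
    · rw [List.nil_append, List.length_append, ih (n / 2) (by omega) h2]
      simp [Nat.add_comm]
    · have h1 : n = 1 := by omega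
      subst h1
      rw [aInner_stop _ _ (by omega)]
      norm_num

theorem aInner_count1 (n : Nat) : 0 < n → (aInner (n : Int) []).count '1' = PySem.Int.bitCount (n : Int) := by
  induction n using Nat.strong_induction_on with
  | _ n ih =>
    intro hpos
    conv_lhs => rw [aInner]
    simp only [show (1 : Int) ≤ (n : Int) by omega, dif_pos, pyfd]
    rw [aInner_acc, PySem.Int.bitCount_natCast hpos, digit_chars]
    by_cases h2 : 0 < n / 2
    · rw [List.nil_append, List.count_append, ih (n / 2) (by omega) h2]
      rcases Nat.mod_two_eq_zero_or_one n with h | h <;> rw [h] <;> simp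
    · have h1 : n = 1 := by omega
      subst h1
      rw [aInner_stop _ _ (by omega)]
      norm_num

theorem aInner_mem (n : Nat) : ∀ c ∈ aInner (n : Int) [], c = '0' ∨ c = '1' := by
  induction n using Nat.strong_induction_on with
  | _ n ih =>
    intro c hc
    rw [aInner] at hc
    by_cases h : 1 ≤ (n : Int)
    · simp only [h, dif_pos, pyfd] at hc
      rw [aInner_acc, digit_chars] at hc
      rcases List.mem_append.mp hc with hd | ht
      · rcases Nat.mod_two_eq_zero_or_one n with h0 | h0 <;> rw [h0] at hd <;> simp at hd <;> simp [hd]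
      · exact ih (n / 2) (by omega) c ht
    · simp [h] at hc

theorem count_split (l : List Char) (hl : ∀ c ∈ l, c = '0' ∨ c = '1') :
    l.count '0' + l.count '1' = l.length := by
  induction l with
  | nil => rfl
  | cons a t iht =>
    have ha := hl a (by simp)
    have iht' := iht (fun c hc => hl c (by simp [hc]))
    rcases ha with h | h <;> subst h <;>
      simp only [List.count_cons, List.length_cons] <;> simp <;> omega

theorem aInner_count0 (n : Nat) (h : 0 < n) :
    (aInner (n : Int) []).count '0' = PySem.Int.bitLength (n : Int) - PySem.Int.bitCount (n : Int) := by
  have hs := count_split _ (aInner_mem n)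
  rw [aInner_len n h, aInner_count1 n h] at hs
  omega

theorem bitCount_pos (n : Nat) : 0 < n → 1 ≤ PySem.Int.bitCount (n : Int) := by
  induction n using Nat.strong_induction_on with
  | _ n ih =>
    intro hpos
    rw [PySem.Int.bitCount_natCast hpos]
    rcases Nat.mod_two_eq_zero_or_one n with h | h
    · have h2 : 0 < n / 2 := by omega
      have := ih (n / 2) (by omega) h2
      omega
    · omega

theorem aInner_eq_one_iff (n : Nat) (h : 0 < n) : (aInner (n : Int) [] = ['1'] ↔ n = 1) := by
  constructor
  · intro he
    have hl := aInner_len n h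
    rw [he] at hl
    have hlt := PySem.Int.lt_two_pow_bitLength ((n : Int))
    rw [← hl] at hlt
    simp at hlt
    omega
  · intro h1
    subst h1
    conv_lhs => rw [aInner]
    simp only [show (1 : Int) ≤ ((1 : Nat) : Int) by omega, dif_pos, pyfd, digit_chars]
    rw [aInner_stop _ _ (by omega)]
    norm_num

theorem aLoop_one (f : Nat) (a0 a1 : Int) : aLoop f ['1'] a0 a1 = [a0, a1] := by
  cases f <;> simp [aLoop]

theorem aLoop_step (f : Nat) (s : List Char) (a0 a1 : Int) (hne : s ≠ ['1']) :
    aLoop (f + 1) s a0 a1 =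
      aLoop f (aInner ((s.length : Int) - (s.count '0' : Int)) []).reverse (a0 + 1) (a1 + (s.count '0' : Int)) := by
  rw [aLoop, if_neg hne]

theorem bChain_ne_nil : ∀ (f : Nat) (v : Int), bChain f v ≠ []
  | 0, v => by rw [bChain]; simp
  | f + 1, v => by rw [bChain]; split <;> simp

-- B's zip-sum of zeros for a given initial length and chain
def zsum (L : Int) (c : List Int) : Int :=
  (List.zipWith (fun l o => l - o) (L :: c.dropLast.map (fun v => ((PySem.Int.bitLength v : Nat) : Int))) c).sum

theorem zsum_cons (L v : Int) (c : List Int) (hc : c ≠ []) :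
    zsum L (v :: c) = (L - v) + zsum ((PySem.Int.bitLength v : Nat) : Int) c := by
  unfold zsum
  rw [List.dropLast_cons_of_ne_nil hc]
  simp

-- main loop correspondence: A's accumulated loop equals B's staged chain computation
theorem loop_eq (f : Nat) : ∀ (s : List Char) (a0 a1 : Int),
    s ≠ ['1'] → s.count '0' < s.length →
    aLoop (f + 1) s a0 a1 =
      [a0 + ((bChain f ((s.length : Int) - (s.count '0' : Int))).length : Int),
       a1 + zsum (s.length : Int) (bChain f ((s.length : Int) - (s.count '0' : Int)))] := by
  induction f with
  | zero =>
    intro s a0 a1 hne hlt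
    rw [aLoop_step _ _ _ _ hne]
    simp only [aLoop, bChain]
    unfold zsum
    simp only [List.dropLast_singleton, List.zipWith_cons_cons, List.zipWith_nil,
      List.sum_cons, List.sum_nil, List.length_cons, List.length_nil, List.cons.injEq, and_true]
    constructor <;> omega
  | succ m ihm =>
    intro s a0 a1 hne hlt
    have hcle : s.count '0' ≤ s.length := List.count_le_length
    obtain ⟨n1, hcast⟩ : ∃ n : Nat, ((s.length : Int) - (s.count '0' : Int)) = (n : Int) :=
      ⟨s.length - s.count '0', by omega⟩
    have hn1pos : 0 < n1 := by omega
    have hz : ((s.count '0' : Nat) : Int) = (s.length : Int) - ((n1 : Nat) : Int) := by omega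
    rw [aLoop_step _ _ _ _ hne, hcast]
    by_cases hone : n1 = 1
    · subst hone
      rw [(aInner_eq_one_iff 1 (by omega)).mpr rfl]
      rw [show (['1'] : List Char).reverse = ['1'] from rfl, aLoop_one]
      rw [show bChain (m + 1) (((1 : Nat) : Nat) : Int) = [1] by rw [bChain]; norm_num]
      unfold zsum
      simp only [List.dropLast_singleton, List.zipWith_cons_cons, List.zipWith_nil,
        List.sum_cons, List.sum_nil, List.length_cons, List.length_nil, List.cons.injEq, and_true]
      constructor <;> omega
    · have hrev_ne : (aInner ((n1 : Nat) : Int) []).reverse ≠ ['1'] := by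
        intro h
        apply hone
        refine (aInner_eq_one_iff n1 hn1pos).mp ?_
        have := congrArg List.reverse h
        simpa using this
      have hlen : (aInner ((n1 : Nat) : Int) []).reverse.length = PySem.Int.bitLength ((n1 : Nat) : Int) := by
        rw [List.length_reverse, aInner_len n1 hn1pos]
      have hcnt : (aInner ((n1 : Nat) : Int) []).reverse.count '0'
          = PySem.Int.bitLength ((n1 : Nat) : Int) - PySem.Int.bitCount ((n1 : Nat) : Int) := by
        rw [List.count_reverse, aInner_count0 n1 hn1pos]
      have hbcpos := bitCount_pos n1 hn1pos
      have hbcle := PySem.Int.bitCount_le_bitLength ((n1 : Nat) : Int)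
      have hlt' : (aInner ((n1 : Nat) : Int) []).reverse.count '0'
          < (aInner ((n1 : Nat) : Int) []).reverse.length := by
        rw [hlen, hcnt]; omega
      rw [ihm _ (a0 + 1) _ hrev_ne hlt']
      have hones' : ((aInner ((n1 : Nat) : Int) []).reverse.length : Int)
          - ((aInner ((n1 : Nat) : Int) []).reverse.count '0' : Int)
          = ((PySem.Int.bitCount ((n1 : Nat) : Int) : Nat) : Int) := by
        rw [hlen, hcnt]; omega
      rw [hones', hlen]
      have hch : bChain (m + 1) ((n1 : Nat) : Int)
          = ((n1 : Nat) : Int) :: bChain m ((PySem.Int.bitCount ((n1 : Nat) : Int) : Nat) : Int) := by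
        rw [bChain, if_neg (by intro h; exact hone (by exact_mod_cast h))]
      rw [hch, zsum_cons _ _ _ (bChain_ne_nil _ _)]
      simp only [List.length_cons, List.cons.injEq, and_true]
      refine ⟨by push_cast; ring, by rw [hz]; ring⟩

theorem pre_iff (l : List Char) : (∃ c ∈ l, c ≠ '0') ↔ l.count '0' < l.length := by
  constructor
  · rintro ⟨c, hc, hcne⟩
    by_contra hle
    have h1 : l.count '0' ≤ l.length := List.count_le_length
    have heq : l.count '0' = l.length := by omega
    exact hcne (((List.count_eq_length).mp heq c hc).symm)
  · intro hlt
    by_contra hno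
    push Not at hno
    have : l.count '0' = l.length := (List.count_eq_length).mpr (fun b hb => ((hno b hb)).symm)
    omega

theorem toList_eq_one {s : String} (h : s.toList = ['1']) : s = "1" :=
  String.toList_inj.mp h

-- ===== VERDICT =====
theorem solution_spec : Claim_equal_solution := by
  unfold Claim_equal_solution
  intro s _ hpre
  unfold Spec_solution solution solution_alt
  unfold Pre_solution at hpre
  have hpre' : ∃ c ∈ s.toList, c ≠ '0' := by simpa using hpre
  have hlt := (pre_iff s.toList).mp hpre'
  by_cases hs : s = "1"
  · subst hs
    rw [show ("1" : String).toList = ['1'] from rfl, aLoop_one]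
    simp
  · have hne : s.toList ≠ ['1'] := fun h => hs (toList_eq_one h)
    rw [if_neg hs, show s.toList.length + 64 = (s.toList.length + 63) + 1 from rfl]
    rw [loop_eq (s.toList.length + 63) s.toList 0 0 hne hlt]
    unfold zsum
    simp
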